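-- pv_equiv track=rewrite | github.com/s0547068/AbgeordnetenWatch | vereinigung_sicherung_15-06-2017.py | rebuild_topic
-- ===== SOURCE A (Python) =====
-- def get_new_zp_topic(topic):
--     new_topic_letters_counter = topic.index('+')
--     counter = 0
--     new_topic = ''
--
--     for letter in str(topic):
--         if counter <= new_topic_letters_counter:
--             counter += 1
--             new_topic += letter
--     return new_topic
--
-- def rebuild_topic(topic, whitespaces_to_jump):
--     '''
--     Nimmt den Tagesordnungspunkt auseinander und gibt den 'TOP X' zurück
--
--     :param topic: Tagesordnungspunkt (z.B. 'TOP 40 Bundeswehreinsatz im Mittelmeer')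
--     :param whitespaces_to_jump: Spaces die es zu überspringen gilt, bis der Tagesordnungspunktname erreicht wurde (meistens 2)
--     :return: z.B. 'TOP 40 Bundeswehreinsatz im Mittelmeer' wird übergeben mit whitespaces_to_jump = 2 -> returned 'TOP 40'
--     '''
--
--     new_topic = ''
--     if 'Sitzungseröffnung' in topic:
--         new_topic = 'TOP'
--     elif '+' in topic:
--         new_topic = get_new_zp_topic(topic)
--     else:
--         if 'Legislaturbericht Digitale Agenda 2014 bis 2017' in topic:
--             pass
--         found_spaces = 0
--         for letter in str(topic):
--             if letter != ' ' and found_spaces < whitespaces_to_jump: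
--                 new_topic = new_topic + letter
--
--             elif letter == ' ' and found_spaces < whitespaces_to_jump:
--                 new_topic = new_topic + letter
--                 found_spaces = found_spaces + 1
--     return new_topic.strip()
-- ===== SOURCE B (Python) =====
-- def rebuild_topic(topic, whitespaces_to_jump):
--     if 'Sitzungseröffnung' in topic:
--         return 'TOP'
--     if '+' in topic:
--         return topic[:topic.index('+') + 1].strip()
--     pos = 0
--     for _ in range(whitespaces_to_jump):
--         i = topic.find(' ', pos)
--         if i == -1:
--             return topic.strip()
--         pos = i + 1
--     return topic[:pos].strip()
-- ===== Notes on version B (the rewrite author's own statement) =====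
-- stated objective: faster
-- what changed: Replaces the char-by-char accumulation loops (counter-guarded append in the '+' helper, space-counting append in the else branch) by index arithmetic: slice at index('+')+1, and a find(' ', pos) loop that locates the cut position and slices once; the dead Legislaturbericht no-op and the helper are dropped.
import Mathlib
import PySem

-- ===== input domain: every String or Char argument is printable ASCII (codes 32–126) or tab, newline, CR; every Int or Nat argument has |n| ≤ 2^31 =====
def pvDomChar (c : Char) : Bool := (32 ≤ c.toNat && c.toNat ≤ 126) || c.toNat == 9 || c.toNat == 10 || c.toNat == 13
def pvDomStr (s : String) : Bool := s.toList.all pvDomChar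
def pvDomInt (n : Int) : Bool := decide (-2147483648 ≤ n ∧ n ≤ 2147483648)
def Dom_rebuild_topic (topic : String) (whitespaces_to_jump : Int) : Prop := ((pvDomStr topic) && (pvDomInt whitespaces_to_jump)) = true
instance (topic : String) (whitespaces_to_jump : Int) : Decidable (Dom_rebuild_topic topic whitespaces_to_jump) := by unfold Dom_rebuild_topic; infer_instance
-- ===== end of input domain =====

-- B replaces A's char-by-char accumulation loops by index arithmetic (slice at index('+')+1;
-- a find(' ', pos) loop locating the cut, then one slice); objective: faster (measured).

-- ===== PORT A =====
-- topic.index('+') raises when '+' is absent; the only caller guards with '+' in topic,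
-- and under that guard index == find, so Str.find is exact here.
def get_new_zp_topic (topic : String) : String :=
  let new_topic_letters_counter := PySem.Str.find topic "+"
  let st := topic.toList.foldl
    (fun (st : Int × List Char) letter =>
      if st.1 ≤ new_topic_letters_counter then (st.1 + 1, st.2 ++ [letter]) else st)
    (0, [])
  String.ofList st.2

def rebuild_topic (topic : String) (whitespaces_to_jump : Int) : String :=
  let new_topic :=
    if PySem.Str.isIn "Sitzungseröffnung" topic then "TOP"
    else if PySem.Str.isIn "+" topic then get_new_zp_topic topic
    else
      -- (A's 'Legislaturbericht…' membership test guards only 'pass': a no-op, nothing to port)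
      let st := topic.toList.foldl
        (fun (st : List Char × Int) letter =>
          if letter ≠ ' ' ∧ st.2 < whitespaces_to_jump then (st.1 ++ [letter], st.2)
          else if letter = ' ' ∧ st.2 < whitespaces_to_jump then (st.1 ++ [letter], st.2 + 1)
          else st)
        ([], 0)
      String.ofList st.1
  PySem.Str.strip new_topic

-- ===== PORT B =====
-- the 'for _ in range(w): i = topic.find(' ', pos) …' loop with its two returns
def rebuild_topic_go (topic : String) : Nat → Nat → String
  | 0, pos => PySem.Str.strip (PySem.Str.slice topic none (some (pos : Int)))
  | n + 1, pos =>
    let i := PySem.Str.findFrom topic " " (pos : Int)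
    if i = -1 then PySem.Str.strip topic
    else rebuild_topic_go topic n (i.toNat + 1)

def rebuild_topic_alt (topic : String) (whitespaces_to_jump : Int) : String :=
  if PySem.Str.isIn "Sitzungseröffnung" topic then "TOP"
  else if PySem.Str.isIn "+" topic then
    PySem.Str.strip (PySem.Str.slice topic none (some (PySem.Str.find topic "+" + 1)))
  else rebuild_topic_go topic whitespaces_to_jump.toNat 0

-- ===== PRECONDITION & SPEC =====
def Spec_rebuild_topic (topic : String) (whitespaces_to_jump : Int) (out : String) : Prop := out = rebuild_topic_alt topic whitespaces_to_jump
instance (topic : String) (whitespaces_to_jump : Int) (out : String) : Decidable (Spec_rebuild_topic topic whitespaces_to_jump out) := by unfold Spec_rebuild_topic; infer_instance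

-- ===== CLAIM (what is proved, stated in full; the proofs are below) =====
def Claim_equal_rebuild_topic : Prop := ∀ (topic : String) (whitespaces_to_jump : Int), Dom_rebuild_topic topic whitespaces_to_jump → Spec_rebuild_topic topic whitespaces_to_jump (rebuild_topic topic whitespaces_to_jump)

-- ===== LEMMAS AND PROOFS =====

-- what A's space-counting loop appends, phrased by the remaining space budget k
def gk : List Char → Int → List Char
  | [], _ => []
  | c :: t, k => if 0 < k then c :: gk t (if c = ' ' then k - 1 else k) else []

theorem gk_nonpos (l : List Char) (k : Int) (hk : k ≤ 0) : gk l k = [] := by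
  cases l with
  | nil => rfl
  | cons c t => simp [gk]; omega

theorem gk_no_space (l : List Char) (k : Int) (h : ' ' ∉ l) (hk : 0 < k) : gk l k = l := by
  induction l generalizing k with
  | nil => rfl
  | cons c t ih =>
    simp only [List.mem_cons, not_or] at h
    have hc : ¬ c = ' ' := fun hcc => h.1 hcc.symm
    simp [gk, hk, hc, ih k h.2 hk]

theorem gk_split (m r : List Char) (k : Int) (h : ' ' ∉ m) (hk : 0 < k) :
    gk (m ++ ' ' :: r) k = m ++ ' ' :: gk r (k - 1) := by
  induction m generalizing k with
  | nil => simp [gk, hk]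
  | cons c t ih =>
    simp only [List.mem_cons, not_or] at h
    have hc : ¬ c = ' ' := fun hcc => h.1 hcc.symm
    simp [gk, hk, hc, ih k h.2 hk]

theorem prefix_singleton_drop (d : List Char) (i : Nat) (h : i < d.length) :
    [' '] <+: d.drop i ↔ d[i] = ' ' := by
  rw [List.drop_eq_getElem_cons h]
  constructor
  · rintro ⟨u, hu⟩
    injection hu with h1 _
    exact h1.symm
  · intro he; exact ⟨d.drop (i+1), by rw [he]; rfl⟩

theorem foldA_eq_gk (w : Int) (l : List Char) (acc : List Char) (f : Int) :
    (l.foldl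
      (fun (st : List Char × Int) letter =>
        if letter ≠ ' ' ∧ st.2 < w then (st.1 ++ [letter], st.2)
        else if letter = ' ' ∧ st.2 < w then (st.1 ++ [letter], st.2 + 1)
        else st)
      (acc, f)).1 = acc ++ gk l (w - f) := by
  induction l generalizing acc f with
  | nil => simp [gk]
  | cons c t ih =>
    by_cases hf : f < w
    · by_cases hc : c = ' '
      · have h1 : w - (f + 1) = (w - f) - 1 := by omega
        simp [List.foldl_cons, hc, hf, ih, gk, h1]
      · simp [List.foldl_cons, hc, hf, ih, gk]
    · have h0 : ¬ (0:Int) < w - f := by omega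
      have hgt : gk t (w - f) = [] := by
        cases t with
        | nil => simp [gk]
        | cons a b => simp [gk]; omega
      have hgc : gk (c :: t) (w - f) = [] := by simp [gk]; omega
      simp [List.foldl_cons, hf, ih, hgt, hgc]

theorem foldZp_eq_take (n : Int) (l : List Char) (acc : List Char) (c : Int) :
    (l.foldl
      (fun (st : Int × List Char) letter =>
        if st.1 ≤ n then (st.1 + 1, st.2 ++ [letter]) else st)
      (c, acc)).2 = acc ++ l.take (n + 1 - c).toNat := by
  induction l generalizing acc c with
  | nil => simp
  | cons x t ih =>
    by_cases hc : c ≤ n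
    · have h1 : (n + 1 - c).toNat = (n + 1 - (c + 1)).toNat + 1 := by omega
      simp [List.foldl_cons, hc, ih, h1, List.take_succ_cons]
    · have h0 : (n + 1 - c).toNat = 0 := by omega
      simp [List.foldl_cons, hc, ih, h0]

theorem go_spec (topic : String) (n pos : Nat) (hpos : pos ≤ topic.toList.length) :
    rebuild_topic_go topic n pos =
      PySem.Str.strip (String.ofList (topic.toList.take pos ++ gk (topic.toList.drop pos) (n : Int))) := by
  induction n generalizing pos with
  | zero =>
    rw [rebuild_topic_go, gk_nonpos _ _ (by simp)]
    congr 1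
    rw [← String.toList_inj, PySem.Str.toList_slice, String.toList_ofList,
        PySem.Chars.slice_eq_listSlice, PySem.List.slice_to_natCast]
    simp
  | succ n ih =>
    rw [rebuild_topic_go]
    have hsp : (" " : String).toList = [' '] := by decide
    have hff : PySem.Str.findFrom topic " " (pos : Int) =
        PySem.Chars.findFrom topic.toList [' '] (pos : Int) := by
      rw [PySem.Str.findFrom_eq, hsp]
    set l := topic.toList with hl
    set d := l.drop pos with hd
    have hnc := PySem.Chars.findFrom_natCast l [' '] pos hpos
    by_cases hj : PySem.Chars.find d [' '] = -1
    · have hred : (if PySem.Chars.find (l.drop pos) [' '] = -1 then (-1:Int)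
          else ↑pos + PySem.Chars.find (l.drop pos) [' ']) = -1 := by
        rw [← hd, hj]; simp
      rw [hff, hnc, hred, if_pos rfl]
      have hno : ' ' ∉ d := by
        intro hmem
        have : [' '] <:+: d := by
          obtain ⟨m1, m2, hm⟩ := List.mem_iff_append.mp hmem
          exact ⟨m1, m2, by simp [hm]⟩
        exact ((PySem.Chars.find_eq_neg_one_iff d [' ']).mp hj) this
      rw [gk_no_space d _ hno (by exact_mod_cast Nat.succ_pos n)]
      congr 1
      rw [← String.toList_inj, String.toList_ofList, hd, List.take_append_drop]
    · have h0 : 0 ≤ PySem.Chars.find d [' '] := by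
        have := PySem.Chars.neg_one_le_find d [' ']; omega
      set j := (PySem.Chars.find d [' ']).toNat with hjn
      obtain ⟨hpre, hmin⟩ := PySem.Chars.find_spec (s := d) (sub := [' ']) h0
      have hjlen : j < d.length := by
        by_contra hge
        rw [not_lt] at hge
        rw [List.drop_eq_nil_of_le hge] at hpre
        simp at hpre
      have hspace : d[j] = ' ' := (prefix_singleton_drop d j hjlen).mp hpre
      have hm : ' ' ∉ d.take j := by
        intro hmem
        obtain ⟨i, hi, hgi⟩ := List.mem_iff_getElem.mp hmem
        have hij : i < j := by simp at hi; omega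
        have hil : i < d.length := by omega
        rw [List.getElem_take] at hgi
        exact hmin i hij ((prefix_singleton_drop d i hil).mpr hgi)
      have hcond : ¬ ((pos : Int) + PySem.Chars.find d [' '] = -1) := by omega
      have htn : (((pos : Int) + PySem.Chars.find d [' ']).toNat) = pos + j := by omega
      have hred : (if PySem.Chars.find (l.drop pos) [' '] = -1 then (-1:Int)
          else ↑pos + PySem.Chars.find (l.drop pos) [' ']) = ↑pos + PySem.Chars.find d [' '] := by
        rw [← hd, if_neg hj]
      rw [hff, hnc, hred, if_neg hcond, htn]
      have hdlen : d.length = l.length - pos := by rw [hd, List.length_drop]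
      have hpos' : pos + j + 1 ≤ l.length := by omega
      rw [ih (pos + j + 1) hpos']
      have hdecomp : d = d.take j ++ ' ' :: d.drop (j+1) := by
        conv_lhs => rw [← List.take_append_drop j d]
        rw [List.drop_eq_getElem_cons hjlen, hspace]
      have hcast : ((n + 1 : Nat) : Int) - 1 = (n : Int) := by push_cast; ring
      have hgk : gk d ((n + 1 : Nat) : Int) = d.take j ++ ' ' :: gk (d.drop (j+1)) (n : Int) := by
        calc gk d ((n + 1 : Nat) : Int)
            = gk (d.take j ++ ' ' :: d.drop (j+1)) ((n + 1 : Nat) : Int) := by rw [← hdecomp]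
          _ = d.take j ++ ' ' :: gk (d.drop (j+1)) (((n + 1 : Nat) : Int) - 1) :=
              gk_split _ _ _ hm (by exact_mod_cast Nat.succ_pos n)
          _ = d.take j ++ ' ' :: gk (d.drop (j+1)) (n : Int) := by rw [hcast]
      have hget? : d[j]?.toList = [' '] := by simp [List.getElem?_eq_getElem hjlen, hspace]
      have htake : l.take (pos + j + 1) = l.take pos ++ (d.take j ++ [' ']) := by
        rw [show pos + j + 1 = pos + (j + 1) by omega, List.take_add, ← hd,
            List.take_add_one, hget?]
      have hdrop : l.drop (pos + j + 1) = d.drop (j+1) := by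
        rw [hd, List.drop_drop, Nat.add_assoc]
      have hlist : List.take (pos + j + 1) l ++ gk (List.drop (pos + j + 1) l) (n : Int)
          = List.take pos l ++ gk d ((n + 1 : Nat) : Int) := by
        rw [htake, hdrop, hgk, List.append_assoc]
        simp
      rw [hlist]

-- ===== VERDICT (by name: the statement is the Claim_ definition above) =====
set_option maxHeartbeats 1000000 in
theorem rebuild_topic_spec : Claim_equal_rebuild_topic := by
  intro topic w _
  show rebuild_topic topic w = rebuild_topic_alt topic w
  simp only [rebuild_topic, rebuild_topic_alt, get_new_zp_topic]
  by_cases h1 : PySem.Str.isIn "Sitzungseröffnung" topic = true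
  · rw [if_pos h1, if_pos h1]
    decide
  · rw [if_neg h1, if_neg h1]
    by_cases h2 : PySem.Str.isIn "+" topic = true
    · rw [if_pos h2, if_pos h2]
      have hn : 0 ≤ PySem.Str.find topic "+" := by
        rw [PySem.Str.find_nonneg_iff]
        exact (PySem.Str.isIn_iff_infix "+" topic).mp h2
      refine congrArg PySem.Str.strip ?_
      rw [foldZp_eq_take, ← String.toList_inj, String.toList_ofList, PySem.Str.toList_slice,
          PySem.Chars.slice_eq_listSlice,
          PySem.List.slice_to (xs := topic.toList) (b := PySem.Str.find topic "+" + 1) (by omega)]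
      simp
    · rw [if_neg h2, if_neg h2]
      rw [go_spec topic w.toNat 0 (Nat.zero_le _), foldA_eq_gk]
      have hg : gk topic.toList (w - 0) = gk topic.toList ((w.toNat : Nat) : Int) := by
        by_cases hw : 0 ≤ w
        · rw [sub_zero, Int.toNat_of_nonneg hw]
        · rw [gk_nonpos _ _ (by omega), gk_nonpos _ _ (by omega)]
      rw [hg]
      simp
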